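-- pv_equiv track=rewrite | github.com/alexLAP7/Simple-Time-Optimization-Task | main.py | _find_the_best_list
-- ===== SOURCE A (Python) =====
-- def _find_the_best_list(list_of_valid_lists_of_times: list):
--     if list_of_valid_lists_of_times:
--         list_of_sum = []
--         for i, v in enumerate(list_of_valid_lists_of_times):
--             list_of_sum.append(sum(range(len(v))))
--
--         index_of_the_best_list = list_of_sum.index(min(list_of_sum))
--         return list_of_valid_lists_of_times[index_of_the_best_list]
--     return None
-- ===== SOURCE B (Python) =====
-- def _find_the_best_list(list_of_valid_lists_of_times: list):
--     best = None
--     best_key = None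
--     for v in list_of_valid_lists_of_times:
--         n = len(v)
--         key = n * (n - 1) // 2  # closed form of sum(range(n))
--         if best_key is None or key < best_key:
--             best, best_key = v, key
--     return best
-- ===== Notes on version B (the rewrite author's own statement) =====
-- stated objective: simpler
-- what changed: Single pass tracking the current best list and its closed-form triangular key n*(n-1)//2 (strict < keeps the first minimum), instead of materialising a list of sum(range(len(v))) values and then scanning it twice with min() and .index().
import Mathlib
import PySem

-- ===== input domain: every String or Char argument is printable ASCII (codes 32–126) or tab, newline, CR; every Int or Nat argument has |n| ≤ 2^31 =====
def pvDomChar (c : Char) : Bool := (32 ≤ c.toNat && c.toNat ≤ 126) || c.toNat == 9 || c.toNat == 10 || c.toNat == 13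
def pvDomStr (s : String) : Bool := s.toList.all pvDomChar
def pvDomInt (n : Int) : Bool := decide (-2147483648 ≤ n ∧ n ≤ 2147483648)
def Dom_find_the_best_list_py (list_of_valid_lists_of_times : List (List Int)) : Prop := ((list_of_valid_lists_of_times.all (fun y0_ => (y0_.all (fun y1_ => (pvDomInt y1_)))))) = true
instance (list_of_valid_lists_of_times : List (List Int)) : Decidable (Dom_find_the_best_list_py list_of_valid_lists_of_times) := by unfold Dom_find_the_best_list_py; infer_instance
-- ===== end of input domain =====

-- B replaces A's list-of-sums plus min()/.index() double scan by a single tracking pass with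
-- the closed-form key n*(n-1)//2 (objective: simpler).

-- ===== PORT A =====
def find_the_best_list_py (list_of_valid_lists_of_times : List (List Int)) : Option (List Int) :=
  if list_of_valid_lists_of_times ≠ [] then
    -- for i, v in enumerate(...): list_of_sum.append(sum(range(len(v))))
    let list_of_sum : List Int :=
      (PySem.List.enumerate list_of_valid_lists_of_times 0).foldl
        (fun acc iv => acc ++ [(PySem.List.pyRange 0 (iv.2.length : Int) 1).sum]) []
    match PySem.List.min? list_of_sum (fun x => x) with
    | some m =>
      match PySem.List.index? list_of_sum m with
      | some idx => PySem.List.pyGet? list_of_valid_lists_of_times (idx : Int)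
      | none => none   -- unreachable: m ∈ list_of_sum
    | none => none     -- unreachable: list_of_sum ≠ []
  else none

-- ===== PORT B =====
def find_the_best_list_py_alt (list_of_valid_lists_of_times : List (List Int)) : Option (List Int) :=
  (list_of_valid_lists_of_times.foldl
    (fun st v =>
      let n : Int := v.length
      let key := PySem.Int.floordiv (n * (n - 1)) 2
      match st with
      | none => some (v, key)
      | some (b, bk) => if key < bk then some (v, key) else some (b, bk))
    none).map Prod.fst

-- ===== PRECONDITION & SPEC =====
def Spec_find_the_best_list_py (list_of_valid_lists_of_times : List (List Int)) (out : Option (List Int)) : Prop := out = find_the_best_list_py_alt list_of_valid_lists_of_times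
instance (list_of_valid_lists_of_times : List (List Int)) (out : Option (List Int)) : Decidable (Spec_find_the_best_list_py list_of_valid_lists_of_times out) := by unfold Spec_find_the_best_list_py; infer_instance

-- ===== CLAIM (what is proved, stated in full; the proofs are below) =====
def Claim_equal_find_the_best_list_py : Prop := ∀ (list_of_valid_lists_of_times : List (List Int)), Dom_find_the_best_list_py list_of_valid_lists_of_times → Spec_find_the_best_list_py list_of_valid_lists_of_times (find_the_best_list_py list_of_valid_lists_of_times)

-- ===== LEMMAS AND PROOFS =====

-- the key both sides compute for a sublist: the triangular number
def triKey (v : List Int) : Int := ((v.length : Int) * ((v.length : Int) - 1)) / 2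

-- reference "first minimum" selector
def pickMin {α : Type} (f : α → Int) : List α → Option α
  | [] => none
  | x :: xs =>
    match pickMin f xs with
    | none => some x
    | some y => if f x ≤ f y then some x else some y

-- B's tracking step, for a generic key
def stepB {α : Type} (f : α → Int) (st : Option (α × Int)) (v : α) : Option (α × Int) :=
  match st with
  | none => some (v, f v)
  | some p => if f v < p.2 then some (v, f v) else some p

-- sum(range(n)) doubled is n*(n-1)
lemma sum_pyRange_two_mul (n : Nat) : (PySem.List.pyRange 0 (n : Int) 1).sum * 2 = (n : Int) * ((n : Int) - 1) := by
  induction n with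
  | zero => simp [PySem.List.pyRange_one_eq_nil]
  | succ n ih =>
    have hcast : ((n + 1 : Nat) : Int) = (n : Int) + 1 := by push_cast; ring
    rw [hcast, PySem.List.pyRange_one_succ_right (by positivity), List.sum_append]
    simp only [List.sum_cons, List.sum_nil, add_zero]
    linear_combination ih

-- sum(range(n)) equals the triangular closed form
lemma sum_pyRange_eq (n : Nat) : (PySem.List.pyRange 0 (n : Int) 1).sum = ((n : Int) * ((n : Int) - 1)) / 2 := by
  have h := sum_pyRange_two_mul n
  omega

-- the A-side list_of_sum is just the map of triKey
lemma enum_fold : ∀ (L : List (List Int)) (s : Int) (init : List Int),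
    (PySem.List.enumerate L s).foldl
      (fun acc iv => acc ++ [(PySem.List.pyRange 0 (iv.2.length : Int) 1).sum]) init
    = init ++ L.map triKey := by
  intro L
  induction L with
  | nil => intro s init; simp [PySem.List.enumerate]
  | cons x xs ih =>
    intro s init
    rw [PySem.List.enumerate_cons]
    simp only [List.foldl_cons]
    rw [ih (s + 1) (init ++ [(PySem.List.pyRange 0 (x.length : Int) 1).sum])]
    rw [sum_pyRange_eq x.length]
    simp [triKey]

-- characterisation of pickMin: the first index attaining the minimum
lemma pickMin_spec {α : Type} (f : α → Int) (L : List α) (hL : L ≠ []) :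
    ∃ (k : Nat) (hk : k < L.length), pickMin f L = some (L[k]) ∧
      (∀ (j : Nat) (hj : j < L.length), f (L[k]) ≤ f (L[j])) ∧
      (∀ (j : Nat) (hj : j < L.length), j < k → f (L[k]) < f (L[j])) := by
  induction L with
  | nil => exact absurd rfl hL
  | cons x xs ih =>
    by_cases hxs : xs = []
    · subst hxs
      refine ⟨0, by simp, by simp [pickMin], ?_, ?_⟩
      · intro j hj
        match j with
        | 0 => simp
      · intro j hj hj0; omega
    · obtain ⟨k, hk, hpick, hmin, hstrict⟩ := ih hxs
      by_cases hle : f x ≤ f (xs[k])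
      · refine ⟨0, by simp, ?_, ?_, ?_⟩
        · simp [pickMin, hpick, hle]
        · intro j hj
          match j with
          | 0 => simp
          | j + 1 =>
            simp only [List.getElem_cons_zero, List.getElem_cons_succ]
            exact le_trans hle (hmin j (by simpa using hj))
        · intro j hj hj0; omega
      · refine ⟨k + 1, by simpa using hk, ?_, ?_, ?_⟩
        · simp [pickMin, hpick, hle]
        · intro j hj
          match j with
          | 0 => simp only [List.getElem_cons_succ, List.getElem_cons_zero]; omega
          | j + 1 =>
            simp only [List.getElem_cons_succ]
            exact hmin j (by simpa using hj)
        · intro j hj hjk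
          match j with
          | 0 => simp only [List.getElem_cons_succ, List.getElem_cons_zero]; omega
          | j + 1 =>
            simp only [List.getElem_cons_succ]
            exact hstrict j (by simpa using hj) (by omega)

-- A equals pickMin triKey
lemma a_eq_pick (L : List (List Int)) : find_the_best_list_py L = pickMin triKey L := by
  by_cases hL : L = []
  · subst hL; simp [find_the_best_list_py, pickMin]
  · unfold find_the_best_list_py
    rw [if_pos hL]
    simp only [enum_fold L 0 [], List.nil_append]
    have hs : L.map triKey ≠ [] := by simpa using hL
    cases hmin : PySem.List.min? (L.map triKey) (fun x => x) with
    | none => exact absurd ((PySem.List.min?_eq_none_iff _ _).mp hmin) hs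
    | some m =>
      have hmem : m ∈ L.map triKey := PySem.List.min?_mem hmin
      cases hidx : PySem.List.index? (L.map triKey) m with
      | none =>
        have := (PySem.List.index?_isSome_iff _ _).mpr hmem
        rw [hidx] at this
        exact absurd this (by simp)
      | some k =>
        obtain ⟨hk, hkm, hbefore⟩ := PySem.List.getElem_of_index?_eq_some hidx
        have hkL : k < L.length := by simpa using hk
        have hislow : ∀ y ∈ L.map triKey, m ≤ y := by
          have h := PySem.List.min?_isMin hmin
          simpa using h
        obtain ⟨k', hk', hpick, hmin', hstrict'⟩ := pickMin_spec triKey L hL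
        have hkeq : k = k' := by
          have hmk : triKey (L[k]) = m := by
            have h := hkm; simpa using h
          rcases lt_trichotomy k k' with h | h | h
          · have h1 : triKey (L[k']) < triKey (L[k]) := hstrict' k hkL h
            have h2 : m ≤ triKey (L[k']) :=
              hislow _ (List.mem_map.mpr ⟨L[k'], List.getElem_mem _, rfl⟩)
            omega
          · exact h
          · have h1 : (L.map triKey)[k']'(by simpa using hk') ≠ m := hbefore k' (by simpa using h)
            have h2 : m ≤ (L.map triKey)[k']'(by simpa using hk') :=
              hislow _ (List.getElem_mem _)
            have h3 : triKey (L[k']) ≤ triKey (L[k]) := hmin' k hkL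
            have h4 : (L.map triKey)[k']'(by simpa using hk') = triKey (L[k']) := by simp
            omega
        subst hkeq
        rw [hpick]
        have hidx' : List.idxOf? m (List.map triKey L) = some k := by
          rw [← PySem.List.index?_eq_idxOf?]; exact hidx
        simp [hidx', List.getElem?_eq_getElem hkL]

-- B's tracking fold computes pickMin with the accumulator as fallback
lemma foldB {α : Type} (f : α → Int) :
    ∀ (L : List α) (b : α),
      L.foldl (stepB f) (some (b, f b))
      = some (match pickMin f L with
              | none => (b, f b)
              | some y => if f y < f b then (y, f y) else (b, f b)) := by
  intro L
  induction L with
  | nil => intro b; simp [pickMin]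
  | cons x xs ih =>
    intro b
    simp only [List.foldl_cons, stepB]
    by_cases hxb : f x < f b
    · rw [if_pos hxb, ih x]
      cases hp : pickMin f xs with
      | none => simp [pickMin, hp, hxb]
      | some y =>
        by_cases hxy : f x ≤ f y
        · simp [pickMin, hp, hxy, hxb]
        · have hyb : f y < f b := by omega
          simp [pickMin, hp, hxy, hyb]
    · rw [if_neg hxb, ih b]
      cases hp : pickMin f xs with
      | none => simp [pickMin, hp, hxb]
      | some y =>
        by_cases hxy : f x ≤ f y
        · by_cases hyb : f y < f b
          · simp [pickMin, hp, hxy, hxb, hyb]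
            omega
          · simp [pickMin, hp, hxy, hxb, hyb]
        · simp [pickMin, hp, hxy]

-- the port's step function is stepB with f = triKey
lemma step_eq :
    (fun (st : Option (List Int × Int)) (v : List Int) =>
      let n : Int := v.length
      let key := PySem.Int.floordiv (n * (n - 1)) 2
      match st with
      | none => some (v, key)
      | some (b, bk) => if key < bk then some (v, key) else some (b, bk))
    = stepB triKey := by
  funext st v
  have hkey : PySem.Int.floordiv ((v.length : Int) * ((v.length : Int) - 1)) 2 = triKey v := by
    rw [PySem.Int.floordiv_eq_ediv_of_pos (by norm_num)]; rfl
  cases st with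
  | none => simp only [stepB]; rw [hkey]
  | some p =>
    cases p
    simp only [stepB]
    rw [hkey]

-- B equals pickMin triKey
lemma b_eq_pick (L : List (List Int)) : find_the_best_list_py_alt L = pickMin triKey L := by
  unfold find_the_best_list_py_alt
  rw [step_eq]
  cases L with
  | nil => simp [pickMin]
  | cons x xs =>
    simp only [List.foldl_cons]
    have hx : stepB triKey none x = some (x, triKey x) := rfl
    rw [hx, foldB triKey xs x]
    cases hp : pickMin triKey xs with
    | none => simp [pickMin, hp]
    | some y =>
      by_cases h : triKey y < triKey x
      · simp [pickMin, hp, h]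
      · simp [pickMin, hp, h]

-- ===== VERDICT (by name: the statement is the Claim_ definition above) =====
theorem find_the_best_list_py_spec : Claim_equal_find_the_best_list_py := by
  intro L _
  unfold Spec_find_the_best_list_py
  rw [a_eq_pick, b_eq_pick]
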